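-- pv_equiv track=rewrite | github.com/adenis033/BioInformatics | Project_L7/ex2_lab7.py | find_consecutive_repeats
-- ===== SOURCE A (Python) =====
-- from collections import Counter
--
-- def find_consecutive_repeats(seq, min_len=6, max_len=10):
--     repeats = {}
--     for k in range(min_len, max_len + 1):
--         counts = Counter()
--         i = 0
--         while i <= len(seq) - k:
--             kmer = seq[i:i+k]
--             repeat_count = 0
--             while seq[i + repeat_count*k : i + (repeat_count+1)*k] == kmer:
--                 repeat_count += 1
--             if repeat_count >= 2:
--                 counts[kmer] += 1  # just count it once per consecutive occurrence
--                 i += repeat_count * k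
--             else:
--                 i += 1
--         repeats[k] = counts
--     return repeats
-- ===== SOURCE B (Python) =====
-- from collections import Counter
--
--
-- def _count_runs(seq, k):
--     # phase 1: run-length table — cnt[i] = number of consecutive copies of
--     # seq[i:i+k] starting at i, built in one right-to-left pass
--     n = len(seq)
--     cnt = [1] * (n - k + 1)
--     for i in range(n - k, -1, -1):
--         if i + 2 * k <= n and seq[i:i+k] == seq[i+k:i+2*k]:
--             cnt[i] = 1 + cnt[i+k]
--     # phase 2: greedy consumption using the table
--     counts = Counter()
--     i = 0
--     while i <= n - k:
--         if cnt[i] >= 2: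
--             counts[seq[i:i+k]] += 1
--             i += cnt[i] * k
--         else:
--             i += 1
--     return counts
--
--
-- def find_consecutive_repeats(seq, min_len=6, max_len=10):
--     return {k: _count_runs(seq, k) for k in range(min_len, max_len + 1)}
-- ===== Notes on version B (the rewrite author's own statement) =====
-- stated objective: alternative
-- what changed: Replaces A's nested rescanning while-loops with a two-phase algorithm per k-mer length: a right-to-left pass builds a run-length table cnt[i] (copies of seq[i:i+k] starting at i), and the greedy counting pass then just looks runs up in the table; the result dict is assembled by a comprehension over a pure helper.
import Mathlib
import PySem

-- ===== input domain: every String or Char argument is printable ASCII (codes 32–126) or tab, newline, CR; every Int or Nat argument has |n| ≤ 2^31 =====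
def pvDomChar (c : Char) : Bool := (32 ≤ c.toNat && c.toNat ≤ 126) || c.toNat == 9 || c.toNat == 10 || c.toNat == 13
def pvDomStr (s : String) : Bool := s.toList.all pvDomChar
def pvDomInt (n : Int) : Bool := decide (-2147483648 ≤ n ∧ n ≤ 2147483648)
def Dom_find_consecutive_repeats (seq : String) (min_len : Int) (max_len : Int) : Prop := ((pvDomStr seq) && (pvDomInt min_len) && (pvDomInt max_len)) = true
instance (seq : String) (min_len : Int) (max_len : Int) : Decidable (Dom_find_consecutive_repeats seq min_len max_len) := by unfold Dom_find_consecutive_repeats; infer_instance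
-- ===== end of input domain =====

-- B replaces A's nested rescanning while-loops by a run-length table built in one
-- right-to-left pass plus a table-driven greedy counting pass (alternative decomposition,
-- similar cost). Both while loops are ported with fuel |seq|+1, which never runs out on Pre_.

-- ===== PORT A =====
-- inner 'while seq[i + rc*k : i + (rc+1)*k] == kmer: rc += 1'
def pvInnerA (s : List Char) (kmer : List Char) (i k : Int) : Nat → Int → Int
  | 0, rc => rc
  | f+1, rc =>
    if PySem.List.slice s (some (i + rc*k)) (some (i + (rc+1)*k)) = kmer then
      pvInnerA s kmer i k f (rc+1)
    else rc

-- outer 'while i <= len(seq) - k' loop of A (kmer = seq[i:i+k] written inline)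
def pvScanA (s : List Char) (k : Int) : Nat → Int → PySem.Dict String Int → PySem.Dict String Int
  | 0, _, counts => counts
  | f+1, i, counts =>
    if i ≤ (s.length : Int) - k then
      if 2 ≤ pvInnerA s (PySem.List.slice s (some i) (some (i+k))) i k (s.length + 1) 0 then
        pvScanA s k f (i + (pvInnerA s (PySem.List.slice s (some i) (some (i+k))) i k (s.length + 1) 0) * k)
          (counts.modify (String.ofList (PySem.List.slice s (some i) (some (i+k)))) 0 (· + 1))
      else pvScanA s k f (i+1) counts
    else counts

def find_consecutive_repeats (seq : String) (min_len : Int) (max_len : Int) : List (Int × List (String × Int)) :=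
  ((PySem.List.pyRange min_len (max_len + 1) 1).foldl
    (fun (r : PySem.Dict Int (PySem.Dict String Int)) k =>
      r.insert k (pvScanA seq.toList k (seq.toList.length + 1) 0 PySem.Dict.empty))
    PySem.Dict.empty).items.map (fun p => (p.1, p.2.items))

-- ===== PORT B =====
-- loop body of phase 1: 'if i+2*k <= n and seq[i:i+k] == seq[i+k:i+2*k]: cnt[i] = 1 + cnt[i+k]'
def pvStepB (s : List Char) (k : Int) (tab : List Int) (i : Int) : List Int :=
  if i + 2*k ≤ (s.length : Int) ∧
     PySem.List.slice s (some i) (some (i+k)) = PySem.List.slice s (some (i+k)) (some (i+2*k)) then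
    PySem.List.pySetD tab i (1 + PySem.List.pyGetD tab (i+k) 1)
  else tab

-- phase 1: 'cnt = [1]*(n-k+1); for i in range(n-k, -1, -1): ...'
def pvBuildTab (s : List Char) (k : Int) : List Int :=
  (PySem.List.pyRange ((s.length : Int) - k) (-1) (-1)).foldl (pvStepB s k)
    (List.replicate ((s.length : Int) - k + 1).toNat 1)

-- phase 2: 'while i <= n-k: if cnt[i] >= 2: counts[seq[i:i+k]] += 1; i += cnt[i]*k else: i += 1'
def pvScanB (s : List Char) (k : Int) (tab : List Int) : Nat → Int → PySem.Dict String Int → PySem.Dict String Int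
  | 0, _, counts => counts
  | f+1, i, counts =>
    if i ≤ (s.length : Int) - k then
      if 2 ≤ PySem.List.pyGetD tab i 1 then
        pvScanB s k tab f (i + (PySem.List.pyGetD tab i 1) * k)
          (counts.modify (String.ofList (PySem.List.slice s (some i) (some (i+k)))) 0 (· + 1))
      else pvScanB s k tab f (i+1) counts
    else counts

def pvCountRuns (s : List Char) (k : Int) : PySem.Dict String Int :=
  pvScanB s k (pvBuildTab s k) (s.length + 1) 0 PySem.Dict.empty

def find_consecutive_repeats_alt (seq : String) (min_len : Int) (max_len : Int) : List (Int × List (String × Int)) :=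
  (PySem.List.pyRange min_len (max_len + 1) 1).map
    (fun k => (k, (pvCountRuns seq.toList k).items))

-- ===== PRECONDITION & SPEC =====
-- Pre_ excludes exactly the inputs where some k in range(min_len, max_len+1) is ≤ 0:
-- there Python A never returns (its inner while compares empty slices forever).
def Pre_find_consecutive_repeats (seq : String) (min_len : Int) (max_len : Int) : Prop :=
  max_len < min_len ∨ 1 ≤ min_len
instance (seq : String) (min_len : Int) (max_len : Int) : Decidable (Pre_find_consecutive_repeats seq min_len max_len) := by unfold Pre_find_consecutive_repeats; infer_instance

def pvWitness_find_consecutive_repeats : String × Int × Int := ("ACACACGT", 1, 3)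

def Spec_find_consecutive_repeats (seq : String) (min_len : Int) (max_len : Int) (out : List (Int × List (String × Int))) : Prop := out = find_consecutive_repeats_alt seq min_len max_len
instance (seq : String) (min_len : Int) (max_len : Int) (out : List (Int × List (String × Int))) : Decidable (Spec_find_consecutive_repeats seq min_len max_len out) := by unfold Spec_find_consecutive_repeats; infer_instance

-- ===== CLAIM (what is proved, stated in full; the proofs are below) =====
def Claim_equal_find_consecutive_repeats : Prop := ∀ (seq : String) (min_len : Int) (max_len : Int), Dom_find_consecutive_repeats seq min_len max_len → Pre_find_consecutive_repeats seq min_len max_len → Spec_find_consecutive_repeats seq min_len max_len (find_consecutive_repeats seq min_len max_len)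

-- ===== LEMMAS AND PROOFS =====

-- one block of length k starting at i
def pvBlk (s : List Char) (k i : Int) : List Char :=
  PySem.List.slice s (some i) (some (i+k))

-- fuelled run-length recurrence (0 at fuel 0)
def pvRcF (s : List Char) (k : Int) : Nat → Int → Int
  | 0, _ => 0
  | f+1, i =>
    if i + 2*k ≤ (s.length : Int) ∧ pvBlk s k i = pvBlk s k (i+k) then
      1 + pvRcF s k f (i+k)
    else 1

theorem pvRcF_succ_def (s : List Char) (k : Int) (f : Nat) (i : Int) :
    pvRcF s k (f+1) i =
      if i + 2*k ≤ (s.length : Int) ∧ pvBlk s k i = pvBlk s k (i+k) then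
        1 + pvRcF s k f (i+k)
      else 1 := rfl

theorem pvInnerA_succ_def (s : List Char) (kmer : List Char) (i k : Int) (f : Nat) (rc : Int) :
    pvInnerA s kmer i k (f+1) rc =
      if PySem.List.slice s (some (i + rc*k)) (some (i + (rc+1)*k)) = kmer then
        pvInnerA s kmer i k f (rc+1)
      else rc := rfl

theorem pvScanA_succ_def (s : List Char) (k : Int) (f : Nat) (i : Int) (counts : PySem.Dict String Int) :
    pvScanA s k (f+1) i counts =
      if i ≤ (s.length : Int) - k then
        if 2 ≤ pvInnerA s (PySem.List.slice s (some i) (some (i+k))) i k (s.length + 1) 0 then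
          pvScanA s k f (i + (pvInnerA s (PySem.List.slice s (some i) (some (i+k))) i k (s.length + 1) 0) * k)
            (counts.modify (String.ofList (PySem.List.slice s (some i) (some (i+k)))) 0 (· + 1))
        else pvScanA s k f (i+1) counts
      else counts := rfl

theorem pvScanB_succ_def (s : List Char) (k : Int) (tab : List Int) (f : Nat) (i : Int) (counts : PySem.Dict String Int) :
    pvScanB s k tab (f+1) i counts =
      if i ≤ (s.length : Int) - k then
        if 2 ≤ PySem.List.pyGetD tab i 1 then
          pvScanB s k tab f (i + (PySem.List.pyGetD tab i 1) * k)
            (counts.modify (String.ofList (PySem.List.slice s (some i) (some (i+k)))) 0 (· + 1))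
        else pvScanB s k tab f (i+1) counts
      else counts := rfl

theorem pvRcF_nonneg (s : List Char) (k : Int) (f : Nat) (i : Int) : 0 ≤ pvRcF s k f i := by
  induction f generalizing i with
  | zero => simp [pvRcF]
  | succ f ih =>
    rw [pvRcF_succ_def]
    split
    · have := ih (i+k); omega
    · omega

theorem pvBlk_length (s : List Char) (k x : Int) (hk : 1 ≤ k) (hx : 0 ≤ x) :
    (pvBlk s k x).length = min k.toNat (s.length - x.toNat) := by
  unfold pvBlk
  rw [PySem.List.slice_toNat s hx (by omega)]
  simp only [List.length_take, List.length_drop]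
  omega

-- an equal full block forces the next block to fit entirely
theorem pvBlk_eq_bound (s : List Char) (k x : Int) (hk : 1 ≤ k) (hx : 0 ≤ x)
    (hxk : x + k ≤ (s.length : Int)) (h : pvBlk s k x = pvBlk s k (x+k)) :
    x + 2*k ≤ (s.length : Int) := by
  have h1 := pvBlk_length s k x hk hx
  have h2 := pvBlk_length s k (x+k) hk (by omega)
  rw [h, h2] at h1
  omega

-- the inner while of A computes the run-length recurrence (same fuel)
theorem pvInnerA_eq (s : List Char) (k : Int) (kmer : List Char) (i : Int) (hk : 1 ≤ k) :
    ∀ (f : Nat) (j : Int), 0 ≤ i + j*k → i + j*k + k ≤ (s.length : Int) →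
      pvBlk s k (i + j*k) = kmer →
      pvInnerA s kmer i k f j = j + pvRcF s k f (i + j*k) := by
  intro f
  induction f with
  | zero => intro j _ _ _; simp [pvInnerA, pvRcF]
  | succ f ih =>
    intro j hx hxk hblk
    rw [pvInnerA_succ_def]
    have harg : i + (j+1)*k = (i + j*k) + k := by ring
    have hcond : PySem.List.slice s (some (i + j*k)) (some (i + (j+1)*k)) = kmer := by
      rw [harg]; exact hblk
    rw [if_pos hcond]
    by_cases h2 : pvBlk s k ((i + j*k) + k) = kmer
    · have hb : (i + j*k) + 2*k ≤ (s.length : Int) :=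
        pvBlk_eq_bound s k (i + j*k) hk hx hxk (hblk.trans h2.symm)
      have e1 : 0 ≤ i + (j+1)*k := by rw [harg]; omega
      have e2 : i + (j+1)*k + k ≤ (s.length : Int) := by rw [harg]; omega
      have e3 : pvBlk s k (i + (j+1)*k) = kmer := by rw [harg]; exact h2
      rw [ih (j+1) e1 e2 e3, harg, pvRcF_succ_def, if_pos ⟨hb, hblk.trans h2.symm⟩]
      have := pvRcF_nonneg s k f ((i + j*k) + k)
      omega
    · rw [pvRcF_succ_def, if_neg (by rintro ⟨_, hbe⟩; exact h2 (hbe.symm.trans hblk))]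
      cases f with
      | zero => simp [pvInnerA]
      | succ g =>
        rw [pvInnerA_succ_def, if_neg ?_]
        intro hc
        apply h2
        have e : i + (j+1+1)*k = ((i + j*k) + k) + k := by ring
        rw [e, harg] at hc
        exact hc

-- one extra unit of fuel does not matter once fuel*k covers the remaining length
theorem pvRcF_succ_stable (s : List Char) (k : Int) (hk : 1 ≤ k) :
    ∀ (f : Nat) (x : Int), (s.length : Int) - x ≤ (f : Int)*k →
      pvRcF s k (f+1) x = pvRcF s k (f+1+1) x := by
  intro f
  induction f with
  | zero =>
    intro x hx
    rw [Nat.cast_zero, zero_mul] at hx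
    rw [pvRcF_succ_def, pvRcF_succ_def]
    rw [if_neg (by rintro ⟨h, _⟩; omega), if_neg (by rintro ⟨h, _⟩; omega)]
  | succ f ih =>
    intro x hx
    rw [pvRcF_succ_def, pvRcF_succ_def (f := f+1+1)]
    by_cases hc : x + 2*k ≤ (s.length : Int) ∧ pvBlk s k x = pvBlk s k (x+k)
    · rw [if_pos hc, if_pos hc]
      have hfk : ((f+1 : Nat) : Int)*k = (f : Int)*k + k := by push_cast; ring
      have := ih (x+k) (by rw [hfk] at hx; omega)
      omega
    · rw [if_neg hc, if_neg hc]

theorem pvRcF_ge (s : List Char) (k : Int) (hk : 1 ≤ k) (f g : Nat) (hfg : f ≤ g) (x : Int)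
    (h : (s.length : Int) - x ≤ (f : Int)*k) :
    pvRcF s k (f+1) x = pvRcF s k (g+1) x := by
  induction g, hfg using Nat.le_induction with
  | base => rfl
  | succ g hfg ih =>
    have hgk : (f : Int)*k ≤ (g : Int)*k :=
      mul_le_mul_of_nonneg_right (by exact_mod_cast hfg) (by omega)
    exact ih.trans (pvRcF_succ_stable s k hk g x (by omega))

theorem pvRcF_stable (s : List Char) (k : Int) (hk : 1 ≤ k) (f g : Nat) (x : Int)
    (hf : (s.length : Int) - x ≤ (f : Int)*k) (hg : (s.length : Int) - x ≤ (g : Int)*k) :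
    pvRcF s k (f+1) x = pvRcF s k (g+1) x := by
  rcases le_total f g with h | h
  · exact pvRcF_ge s k hk f g h x hf
  · exact (pvRcF_ge s k hk g f h x hg).symm

-- the stable run length (fuel |s|+1 is always enough for nonnegative positions)
def pvCNT (s : List Char) (k x : Int) : Int := pvRcF s k (s.length + 1) x

theorem pvCNT_unfold (s : List Char) (k x : Int) (hk : 1 ≤ k) (hx : 0 ≤ x) :
    pvCNT s k x =
      if x + 2*k ≤ (s.length : Int) ∧ pvBlk s k x = pvBlk s k (x+k) then
        1 + pvCNT s k (x+k)
      else 1 := by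
  unfold pvCNT
  rw [pvRcF_succ_def]
  by_cases hc : x + 2*k ≤ (s.length : Int) ∧ pvBlk s k x = pvBlk s k (x+k)
  · rw [if_pos hc, if_pos hc]
    congr 1
    obtain ⟨hb, _⟩ := hc
    have hN1 : 1 ≤ s.length := by omega
    obtain ⟨N', hN'⟩ : ∃ N', s.length = N' + 1 := ⟨s.length - 1, by omega⟩
    have hk' : (N' : Int) ≤ (N' : Int)*k := le_mul_of_one_le_right (by positivity) hk
    have h1 : (s.length : Int) - (x+k) ≤ (N' : Int)*k := by
      have : (s.length : Int) = (N' : Int) + 1 := by exact_mod_cast congrArg Nat.cast hN'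
      omega
    have h2 : (s.length : Int) - (x+k) ≤ ((N'+1 : Nat) : Int)*k := by
      have e : ((N'+1 : Nat) : Int)*k = (N' : Int)*k + k := by push_cast; ring
      omega
    have hst := pvRcF_stable s k hk N' (N'+1) (x+k) h1 h2
    rw [hN']
    exact hst
  · rw [if_neg hc, if_neg hc]

-- the run length is 1 beyond the last position admitting two full blocks
theorem pvCNT_one_of_big (s : List Char) (k x : Int) (hk : 1 ≤ k)
    (h : (s.length : Int) - 2*k < x) : pvCNT s k x = 1 := by
  unfold pvCNT
  rw [pvRcF_succ_def, if_neg (by rintro ⟨hb, _⟩; omega)]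

-- pyGet/pySet arithmetic helpers
theorem pvGetD_set_ne (tab : List Int) (a x v : Int) (ha : 0 ≤ a) (hx : 0 ≤ x) (hne : x ≠ a) :
    PySem.List.pyGetD (PySem.List.pySetD tab a v) x 1 = PySem.List.pyGetD tab x 1 := by
  rw [PySem.List.pySetD_of_nonneg tab v ha, PySem.List.pyGetD_of_nonneg _ _ hx,
      PySem.List.pyGetD_of_nonneg _ _ hx, List.getD_eq_getElem?_getD, List.getD_eq_getElem?_getD,
      List.getElem?_set, if_neg (by omega)]

theorem pvGetD_set_self (tab : List Int) (a v : Int) (ha : 0 ≤ a) (hlt : a.toNat < tab.length) :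
    PySem.List.pyGetD (PySem.List.pySetD tab a v) a 1 = v := by
  rw [PySem.List.pySetD_of_nonneg tab v ha, PySem.List.pyGetD_of_nonneg _ _ ha,
      List.getD_eq_getElem?_getD, List.getElem?_set, if_pos rfl, if_pos hlt]
  rfl

theorem pvGetD_replicate_one (m : Nat) (x : Int) (hx : 0 ≤ x) :
    PySem.List.pyGetD (List.replicate m (1 : Int)) x 1 = 1 := by
  rw [PySem.List.pyGetD_of_nonneg _ _ hx, List.getD_eq_getElem?_getD, List.getElem?_replicate]
  split <;> rfl

-- the guard slice at a+2k is the block at a+k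
theorem pvBlk_shift (s : List Char) (k a : Int) :
    pvBlk s k (a+k) = PySem.List.slice s (some (a+k)) (some (a+2*k)) := by
  unfold pvBlk
  rw [show (a+k)+k = a+2*k from by ring]

-- table-build invariant: folding the countdown range from a installs pvCNT at 0..a
theorem pvBuild_inv (s : List Char) (k : Int) (hk : 1 ≤ k) :
    ∀ (d : Nat) (a : Int) (tab : List Int), a + 1 = (d : Int) →
      a ≤ (s.length : Int) - k →
      tab.length = ((s.length : Int) - k + 1).toNat →
      (∀ x, a < x → 0 ≤ x → PySem.List.pyGetD tab x 1 = pvCNT s k x) →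
      (∀ x, 0 ≤ x → x ≤ a → PySem.List.pyGetD tab x 1 = 1) →
      ∀ x, 0 ≤ x →
        PySem.List.pyGetD ((PySem.List.pyRange a (-1) (-1)).foldl (pvStepB s k) tab) x 1 = pvCNT s k x := by
  intro d
  induction d with
  | zero =>
    intro a tab ha _ _ h1 _ x hx
    have ha' : a = -1 := by push_cast at ha; omega
    rw [ha', PySem.List.pyRange_neg_one_eq_nil (by omega), List.foldl_nil]
    exact h1 x (by omega) hx
  | succ d ih =>
    intro a tab ha hank hlen h1 h2 x hx
    have ha0 : 0 ≤ a := by push_cast at ha; omega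
    rw [PySem.List.pyRange_neg_one_cons (show (-1 : Int) < a by omega), List.foldl_cons]
    refine ih (a-1) (pvStepB s k tab a) (by push_cast at ha ⊢; omega) (by omega) ?_ ?_ ?_ x hx
    · unfold pvStepB
      split
      · rw [PySem.List.length_pySetD]; exact hlen
      · exact hlen
    · intro y hy hy0
      by_cases hya : y = a
      · subst hya
        unfold pvStepB
        by_cases hg : y + 2*k ≤ (s.length : Int) ∧
            PySem.List.slice s (some y) (some (y+k)) = PySem.List.slice s (some (y+k)) (some (y+2*k))
        · rw [if_pos hg, pvGetD_set_self tab y _ hy0 (by rw [hlen]; omega)]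
          rw [h1 (y+k) (by omega) (by omega)]
          rw [pvCNT_unfold s k y hk hy0,
              if_pos ⟨hg.1, (show pvBlk s k y = _ from hg.2).trans (pvBlk_shift s k y).symm⟩]
        · rw [if_neg hg]
          rw [h2 y hy0 (le_refl y)]
          rw [pvCNT_unfold s k y hk hy0, if_neg ?_]
          intro hc
          exact hg ⟨hc.1, (show _ = pvBlk s k (y+k) from hc.2).trans (pvBlk_shift s k y)⟩
      · have hy' : a < y := by omega
        unfold pvStepB
        split
        · rw [pvGetD_set_ne tab a y _ ha0 hy0 hya]
          exact h1 y hy' hy0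
        · exact h1 y hy' hy0
    · intro y hy0 hy
      unfold pvStepB
      split
      · rw [pvGetD_set_ne tab a y _ ha0 hy0 (by omega)]
        exact h2 y hy0 (by omega)
      · exact h2 y hy0 (by omega)

-- the finished table agrees with pvCNT at every in-range position
theorem pvBuildTab_get (s : List Char) (k : Int) (hk : 1 ≤ k) (x : Int)
    (hx : 0 ≤ x) (hxk : x ≤ (s.length : Int) - k) :
    PySem.List.pyGetD (pvBuildTab s k) x 1 = pvCNT s k x := by
  unfold pvBuildTab
  refine pvBuild_inv s k hk ((s.length : Int) - k + 1).toNat ((s.length : Int) - k) _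
    (by omega) (le_refl _) (by rw [List.length_replicate]) ?_ ?_ x hx
  · intro y hy hy0
    rw [pvGetD_replicate_one _ y hy0, pvCNT_one_of_big s k y hk (by omega)]
  · intro y hy0 _
    exact pvGetD_replicate_one _ y hy0

-- with a correct table, A's scan and B's table-driven scan agree step for step
theorem pvScan_eq (s : List Char) (k : Int) (tab : List Int) (hk : 1 ≤ k)
    (htab : ∀ x, 0 ≤ x → x ≤ (s.length : Int) - k →
      PySem.List.pyGetD tab x 1 = pvCNT s k x) :
    ∀ (f : Nat) (i : Int) (counts : PySem.Dict String Int), 0 ≤ i →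
      pvScanA s k f i counts = pvScanB s k tab f i counts := by
  intro f
  induction f with
  | zero => intro i counts _; rfl
  | succ f ih =>
    intro i counts hi0
    rw [pvScanA_succ_def, pvScanB_succ_def]
    by_cases hile : i ≤ (s.length : Int) - k
    · rw [if_pos hile, if_pos hile]
      have hrc : pvInnerA s (PySem.List.slice s (some i) (some (i+k))) i k (s.length + 1) 0 = pvCNT s k i := by
        have h0 : i + 0*k = i := by ring
        have hh := pvInnerA_eq s k (PySem.List.slice s (some i) (some (i+k))) i hk (s.length + 1) 0
          (by rw [h0]; exact hi0) (by rw [h0]; omega) (by rw [h0]; rfl)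
        rw [hh, h0, zero_add]
        rfl
      rw [hrc, htab i hi0 hile]
      by_cases h2le : 2 ≤ pvCNT s k i
      · rw [if_pos h2le, if_pos h2le]
        have hnn : 0 ≤ pvCNT s k i * k := mul_nonneg (by omega) (by omega)
        exact ih _ _ (by omega)
      · rw [if_neg h2le, if_neg h2le]
        exact ih _ _ (by omega)
    · rw [if_neg hile, if_neg hile]

theorem pvCount_eq (s : List Char) (k : Int) (hk : 1 ≤ k) :
    pvScanA s k (s.length + 1) 0 PySem.Dict.empty = pvCountRuns s k := by
  unfold pvCountRuns
  exact pvScan_eq s k (pvBuildTab s k) hk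
    (fun x hx hxk => pvBuildTab_get s k hk x hx hxk) (s.length + 1) 0 PySem.Dict.empty (le_refl 0)

-- ===== VERDICT (by name: the statement is the Claim_ definition above) =====
theorem find_consecutive_repeats_spec : Claim_equal_find_consecutive_repeats := by
  intro seq min_len max_len _ hpre
  unfold Pre_find_consecutive_repeats at hpre
  unfold Spec_find_consecutive_repeats find_consecutive_repeats find_consecutive_repeats_alt
  rw [PySem.Dict.items_foldl_insert_fresh (PySem.List.pyRange min_len (max_len + 1) 1)
    (fun a => a) (fun a => pvScanA seq.toList a (seq.toList.length + 1) 0 PySem.Dict.empty)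
    PySem.Dict.empty (fun a _ => PySem.Dict.contains_empty a)
    (by rw [List.map_id']; exact PySem.List.nodup_pyRange_one _ _)]
  rw [show (PySem.Dict.empty : PySem.Dict Int (PySem.Dict String Int)).items = [] from rfl,
      List.nil_append, List.map_map]
  refine List.map_congr_left ?_
  intro a ha
  have hmem := PySem.List.mem_pyRange_one.mp ha
  have hk : 1 ≤ a := by rcases hpre with h | h <;> omega
  simp only [Function.comp_apply]
  rw [pvCount_eq seq.toList a hk]
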